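-- pv_equiv track=rewrite | github.com/Ekene-Chris/ai-resume | app/services/role_analyzers/frontend_analyzer.py | _identify_styling_technologies
-- ===== SOURCE A (Python) =====
-- from typing import Dict, Any, List
--
-- def _identify_styling_technologies(technologies: List[str], raw_text: str) -> List[str]:
--     """Identify which styling technologies are mentioned in the resume"""
--     styling_techs = []
--
--     styling_keywords = {
--         "sass": ["sass", "scss"],
--         "less": ["less"],
--         "bootstrap": ["bootstrap"],
--         "tailwind": ["tailwind", "tailwindcss"],
--         "material-ui": ["material-ui", "mui", "material design"],
--         "styled-components": ["styled-components", "styled components"],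
--         "emotion": ["emotion", "css-in-js"],
--         "css-modules": ["css modules", "css-modules"],
--         "postcss": ["postcss"],
--         "bulma": ["bulma"],
--         "chakra-ui": ["chakra", "chakra-ui"],
--         "ant-design": ["ant design", "antd"]
--     }
--
--     for tech, keywords in styling_keywords.items():
--         for keyword in keywords:
--             if any(keyword.lower() in t.lower() for t in technologies) or keyword.lower() in raw_text.lower():
--                 styling_techs.append(tech)
--                 break
--
--     return list(set(styling_techs))  # Remove duplicates
-- ===== SOURCE B (Python) =====
-- from typing import List
--
-- def _identify_styling_technologies(technologies: List[str], raw_text: str) -> List[str]: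
--     """Identify which styling technologies are mentioned in the resume."""
--     styling_keywords = {
--         "sass": ["sass", "scss"],
--         "less": ["less"],
--         "bootstrap": ["bootstrap"],
--         "tailwind": ["tailwind", "tailwindcss"],
--         "material-ui": ["material-ui", "mui", "material design"],
--         "styled-components": ["styled-components", "styled components"],
--         "emotion": ["emotion", "css-in-js"],
--         "css-modules": ["css modules", "css-modules"],
--         "postcss": ["postcss"],
--         "bulma": ["bulma"],
--         "chakra-ui": ["chakra", "chakra-ui"],
--         "ant-design": ["ant design", "antd"]
--     }
--
--     # One lowercased search corpus; '\n' separators cannot occur inside any keyword,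
--     # so a keyword matches the corpus iff it matches some technology or the raw text.
--     corpus = "\n".join(t.lower() for t in technologies) + "\n" + raw_text.lower()
--
--     found = [tech for tech, keywords in styling_keywords.items()
--              if any(kw in corpus for kw in keywords)]
--     return list(set(found))
-- ===== Notes on version B (the rewrite author's own statement) =====
-- stated objective: simpler
-- what changed: Instead of re-scanning and re-lowercasing the whole technologies list and raw_text once per keyword, B builds a single lowercased newline-joined corpus up front and reduces each technology to one comprehension filter with a plain substring test against that corpus.
import Mathlib
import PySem

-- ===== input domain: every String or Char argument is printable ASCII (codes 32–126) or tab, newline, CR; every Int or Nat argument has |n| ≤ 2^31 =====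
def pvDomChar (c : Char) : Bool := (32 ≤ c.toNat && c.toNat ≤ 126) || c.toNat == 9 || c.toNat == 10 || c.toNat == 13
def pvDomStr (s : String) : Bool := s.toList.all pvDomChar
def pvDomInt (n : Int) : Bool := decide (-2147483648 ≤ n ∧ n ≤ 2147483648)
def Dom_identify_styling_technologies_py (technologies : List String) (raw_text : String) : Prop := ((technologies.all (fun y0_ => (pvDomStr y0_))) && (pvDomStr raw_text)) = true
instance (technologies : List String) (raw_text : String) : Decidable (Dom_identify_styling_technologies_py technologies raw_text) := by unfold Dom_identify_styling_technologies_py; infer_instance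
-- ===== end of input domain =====

-- B builds one lowercased newline-joined corpus and filters the keyword table against it,
-- replacing A's per-keyword rescans of technologies and raw_text (objective: simpler).


-- the styling_keywords dict literal shared by both sources (insertion order)
def pvStylingKeywords : List (String × List String) :=
  [("sass", ["sass", "scss"]),
   ("less", ["less"]),
   ("bootstrap", ["bootstrap"]),
   ("tailwind", ["tailwind", "tailwindcss"]),
   ("material-ui", ["material-ui", "mui", "material design"]),
   ("styled-components", ["styled-components", "styled components"]),
   ("emotion", ["emotion", "css-in-js"]),
   ("css-modules", ["css modules", "css-modules"]),
   ("postcss", ["postcss"]),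
   ("bulma", ["bulma"]),
   ("chakra-ui", ["chakra", "chakra-ui"]),
   ("ant-design", ["ant design", "antd"])]

-- ===== PORT A =====
-- the inner 'for keyword in keywords: if …: append; break' loop of A
def pvAInner (tech : String) (cond : String → Bool) : List String → List String → List String
  | [], acc => acc
  | kw :: rest, acc => if cond kw then acc ++ [tech] else pvAInner tech cond rest acc

def identify_styling_technologies_py (technologies : List String) (raw_text : String) : List String :=
  let styling_techs :=
    pvStylingKeywords.foldl (fun acc p =>
      pvAInner p.1
        (fun keyword =>
          technologies.any (fun t => PySem.Str.isIn (PySem.Str.lower keyword) (PySem.Str.lower t)) ||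
          PySem.Str.isIn (PySem.Str.lower keyword) (PySem.Str.lower raw_text))
        p.2 acc) []
  PySem.Set.ofList styling_techs  -- list(set(styling_techs))

-- ===== PORT B =====
def identify_styling_technologies_py_alt (technologies : List String) (raw_text : String) : List String :=
  let corpus := PySem.Str.join "\n" (technologies.map (fun t => PySem.Str.lower t)) ++ "\n" ++ PySem.Str.lower raw_text
  let found := (pvStylingKeywords.filter (fun p => p.2.any (fun kw => PySem.Str.isIn kw corpus))).map (fun p => p.1)
  PySem.Set.ofList found  -- list(set(found))

-- ===== PRECONDITION & SPEC =====
def Spec_identify_styling_technologies_py (technologies : List String) (raw_text : String) (out : List String) : Prop := out = identify_styling_technologies_py_alt technologies raw_text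
instance (technologies : List String) (raw_text : String) (out : List String) : Decidable (Spec_identify_styling_technologies_py technologies raw_text out) := by unfold Spec_identify_styling_technologies_py; infer_instance

-- ===== CLAIM (what is proved, stated in full; the proofs are below) =====
def Claim_equal_identify_styling_technologies_py : Prop := ∀ (technologies : List String) (raw_text : String), Dom_identify_styling_technologies_py technologies raw_text → Spec_identify_styling_technologies_py technologies raw_text (identify_styling_technologies_py technologies raw_text)

-- ===== LEMMAS AND PROOFS =====

-- a keyword of the table: lowercase, nonempty, newline-free
def pvNice (kw : String) : Bool :=
  !(kw.toList.contains '\n') && !(kw.toList.isEmpty) && (PySem.Chars.lower kw.toList == kw.toList)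

-- a prefix of u ++ c :: b avoiding c is a prefix of u
theorem pv_prefix_split (kw u b : List Char) (c : Char) (hc : c ∉ kw)
    (h : kw <+: u ++ c :: b) : kw <+: u := by
  have hlen : kw.length ≤ u.length := by
    by_contra hl
    rw [Nat.not_le] at hl
    have hlt : u.length < (u ++ c :: b).length := by simp
    have h1 : kw[u.length]'hl = (u ++ c :: b)[u.length]'hlt := h.getElem hl
    have h2 : (u ++ c :: b)[u.length]'hlt = c := by
      simp [List.getElem_append_right (Nat.le_refl u.length)]
    exact hc (by rw [← h2, ← h1]; exact List.getElem_mem hl)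
  have he : kw = (u ++ c :: b).take kw.length := List.prefix_iff_eq_take.1 h
  rw [List.take_append_of_le_length hlen] at he
  exact he ▸ List.take_prefix kw.length u

-- an infix of u ++ c :: b avoiding c is an infix of u or of b
theorem pv_infix_append_cons (kw u b : List Char) (c : Char) (hc : c ∉ kw) :
    kw <:+: u ++ c :: b ↔ kw <:+: u ∨ kw <:+: b := by
  constructor
  · intro h
    have h' : PySem.Chars.isIn kw (u ++ c :: b) = true := (PySem.Chars.isIn_iff_infix _ _).2 h
    obtain ⟨j, hj⟩ := (PySem.Chars.exists_prefix_drop_iff_isIn kw (u ++ c :: b)).2 h'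
    by_cases hju : j ≤ u.length
    · rw [List.drop_append_of_le_length hju] at hj
      exact Or.inl ((pv_prefix_split kw _ b c hc hj).isInfix.trans (List.drop_suffix j u).isInfix)
    · rw [Nat.not_le] at hju
      right
      have hdrop : (u ++ c :: b).drop j = b.drop (j - u.length - 1) := by
        rw [List.drop_append]
        rw [List.drop_eq_nil_of_le (by omega : u.length ≤ j)]
        have hj' : j - u.length = (j - u.length - 1) + 1 := by omega
        rw [hj', List.drop_succ_cons, List.nil_append]
        congr 1
      rw [hdrop] at hj
      exact hj.isInfix.trans (List.drop_suffix _ b).isInfix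
  · intro h
    rcases h with h | h
    · exact h.trans ⟨[], c :: b, by simp⟩
    · exact h.trans ⟨u ++ [c], [], by simp⟩

-- membership in a c-joined corpus = membership in some part
theorem pv_isIn_join (kw : List Char) (c : Char) (parts : List (List Char))
    (hc : c ∉ kw) (hne : kw ≠ []) :
    PySem.Chars.isIn kw (PySem.Chars.join [c] parts) = parts.any (fun p => PySem.Chars.isIn kw p) := by
  induction parts with
  | nil =>
    simp only [PySem.Chars.join_nil, List.any_nil]
    rw [Bool.eq_false_iff]
    intro h
    exact hne (List.infix_nil.1 ((PySem.Chars.isIn_iff_infix _ _).1 h))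
  | cons p rest ih =>
    cases rest with
    | nil => simp [PySem.Chars.join_singleton]
    | cons q rest' =>
      rw [PySem.Chars.join_cons_cons]
      have hsplit : p ++ [c] ++ PySem.Chars.join [c] (q :: rest') = p ++ c :: PySem.Chars.join [c] (q :: rest') := by simp
      rw [hsplit, Bool.eq_iff_iff, PySem.Chars.isIn_iff_infix,
          pv_infix_append_cons kw p _ c hc]
      have h2 : kw <:+: PySem.Chars.join [c] (q :: rest') ↔
          ((q :: rest').any (fun p => PySem.Chars.isIn kw p)) = true := by
        rw [← PySem.Chars.isIn_iff_infix, ih]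
      rw [h2]
      simp [List.any_cons, PySem.Chars.isIn_iff_infix]

-- the corpus test equals A's per-keyword condition
theorem pv_cond_eq (kw : String) (technologies : List String) (raw_text : String) (hn : pvNice kw = true) :
    PySem.Str.isIn kw (PySem.Str.join "\n" (technologies.map (fun t => PySem.Str.lower t)) ++ "\n" ++ PySem.Str.lower raw_text)
      = (technologies.any (fun t => PySem.Str.isIn (PySem.Str.lower kw) (PySem.Str.lower t)) ||
         PySem.Str.isIn (PySem.Str.lower kw) (PySem.Str.lower raw_text)) := by
  have hc : '\n' ∉ kw.toList := by
    simp only [pvNice, Bool.and_eq_true, Bool.not_eq_true'] at hn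
    simpa using hn.1.1
  have hne : kw.toList ≠ [] := by
    simp only [pvNice, Bool.and_eq_true, Bool.not_eq_true'] at hn
    simpa [List.isEmpty_iff] using hn.1.2
  have hlow : PySem.Chars.lower kw.toList = kw.toList := by
    simp only [pvNice, Bool.and_eq_true, beq_iff_eq] at hn
    exact hn.2
  have hlowS : (PySem.Str.lower kw).toList = kw.toList := by
    rw [PySem.Str.toList_lower, hlow]
  simp only [PySem.Str.isIn_eq, String.toList_append, PySem.Str.toList_join, PySem.Str.toList_lower, hlowS]
  have hcorp : PySem.Chars.join "\n".toList (List.map String.toList (technologies.map (fun t => PySem.Str.lower t))) ++ "\n".toList ++ PySem.Chars.lower raw_text.toList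
      = PySem.Chars.join ['\n'] (technologies.map (fun t => PySem.Chars.lower t.toList)) ++ '\n' :: PySem.Chars.lower raw_text.toList := by
    simp [List.map_map, Function.comp_def, PySem.Str.toList_lower]
  rw [hcorp, Bool.eq_iff_iff, PySem.Chars.isIn_iff_infix,
      pv_infix_append_cons kw.toList _ _ '\n' hc]
  have h1 : kw.toList <:+: PySem.Chars.join ['\n'] (technologies.map (fun t => PySem.Chars.lower t.toList)) ↔
      ((technologies.map (fun t => PySem.Chars.lower t.toList)).any (fun p => PySem.Chars.isIn kw.toList p)) = true := by
    rw [← PySem.Chars.isIn_iff_infix, pv_isIn_join kw.toList '\n' _ hc hne]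
  rw [h1, List.any_map]
  simp [Function.comp_def, PySem.Chars.isIn_iff_infix]

-- A's inner break-loop is an if-any
theorem pvAInner_eq (tech : String) (cond : String → Bool) (kws acc : List String) :
    pvAInner tech cond kws acc = if kws.any cond then acc ++ [tech] else acc := by
  induction kws with
  | nil => simp [pvAInner]
  | cons kw rest ih =>
    by_cases h : cond kw <;> simp [pvAInner, h, ih]

-- every keyword in the table is lowercase, nonempty and newline-free
theorem pv_table_nice : ∀ p ∈ pvStylingKeywords, ∀ kw ∈ p.2, pvNice kw = true := by decide

-- ===== VERDICT (by name: the statement is the Claim_ definition above) =====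
theorem identify_styling_technologies_py_spec : Claim_equal_identify_styling_technologies_py := by
  intro technologies raw_text _
  show _ = _
  unfold identify_styling_technologies_py identify_styling_technologies_py_alt
  dsimp only
  rw [show (fun (acc : List String) (p : String × List String) =>
      pvAInner p.1 (fun keyword =>
        technologies.any (fun t => PySem.Str.isIn (PySem.Str.lower keyword) (PySem.Str.lower t)) ||
        PySem.Str.isIn (PySem.Str.lower keyword) (PySem.Str.lower raw_text)) p.2 acc)
    = (fun (acc : List String) (p : String × List String) =>
        if p.2.any (fun keyword =>
          technologies.any (fun t => PySem.Str.isIn (PySem.Str.lower keyword) (PySem.Str.lower t)) ||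
          PySem.Str.isIn (PySem.Str.lower keyword) (PySem.Str.lower raw_text)) then acc ++ [p.1] else acc)
    from funext fun acc => funext fun p => pvAInner_eq p.1 _ p.2 acc]
  rw [PySem.List.foldl_append_if (fun p : String × List String =>
        p.2.any (fun keyword =>
          technologies.any (fun t => PySem.Str.isIn (PySem.Str.lower keyword) (PySem.Str.lower t)) ||
          PySem.Str.isIn (PySem.Str.lower keyword) (PySem.Str.lower raw_text))) (fun p => p.1)]
  rw [List.nil_append]
  congr 2
  apply List.filter_congr
  intro p hp
  rw [Bool.eq_iff_iff]
  simp only [List.any_eq_true]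
  constructor <;> rintro ⟨kw, hkw, h⟩ <;> refine ⟨kw, hkw, ?_⟩
  · rw [pv_cond_eq kw technologies raw_text (pv_table_nice p hp kw hkw)]; exact h
  · rw [pv_cond_eq kw technologies raw_text (pv_table_nice p hp kw hkw)] at h; exact h
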